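-- pv_equiv track=rewrite | github.com/asahilina/tilecalc | tilecalc.py | cb
-- ===== SOURCE A (Python) =====
-- def cb(v, w=24, h=0):
--     s = ""
--     for i in range(63, -1, -1):
--         bit = 1 << i
--         if v < bit and h < bit:
--             if i < w:
--                 s += " "
--             continue
--         if i & 1:
--             f = "\x1b[48;5;23;"
--         else:
--             f = "\x1b[48;5;233;"
--         if v & bit:
--             c = "1"
--             if h & bit:
--                 f += "93;1;4"
--             else:
--                 f += "92"
--         else:
--             c = "0"
--             if h & bit:
--                 f += "95;1;4"
--             else:
--                 f += "33"
--         s += f + "m" + c + "\x1b[m"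
--     return s
-- ===== SOURCE B (Python) =====
-- def cb(v, w=24, h=0):
--     # two-phase: compute the top significant bit once, emit leading blanks in one
--     # shot, then a short loop over only the significant bits
--     top = -1
--     if v > 0:
--         top = v.bit_length() - 1
--     if h > 0:
--         top = max(top, h.bit_length() - 1)
--     if top > 63:
--         top = 63
--     s = " " * max(0, min(w, 64) - (top + 1))
--     for i in range(top, -1, -1):
--         if i & 1:
--             f = "\x1b[48;5;23;"
--         else:
--             f = "\x1b[48;5;233;"
--         if v & (1 << i):
--             c = "1"
--             if h & (1 << i):
--                 f += "93;1;4"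
--             else:
--                 f += "92"
--         else:
--             c = "0"
--             if h & (1 << i):
--                 f += "95;1;4"
--             else:
--                 f += "33"
--         s += f + "m" + c + "\x1b[m"
--     return s
-- ===== Notes on version B (the rewrite author's own statement) =====
-- stated objective: alternative
-- what changed: Replaces A's single guarded pass over all 64 bit positions (testing v < bit and h < bit every iteration) by a two-phase form: compute the top significant bit position once via bit_length, emit all leading blanks in one shot, then loop only over the significant bits.
import Mathlib
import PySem

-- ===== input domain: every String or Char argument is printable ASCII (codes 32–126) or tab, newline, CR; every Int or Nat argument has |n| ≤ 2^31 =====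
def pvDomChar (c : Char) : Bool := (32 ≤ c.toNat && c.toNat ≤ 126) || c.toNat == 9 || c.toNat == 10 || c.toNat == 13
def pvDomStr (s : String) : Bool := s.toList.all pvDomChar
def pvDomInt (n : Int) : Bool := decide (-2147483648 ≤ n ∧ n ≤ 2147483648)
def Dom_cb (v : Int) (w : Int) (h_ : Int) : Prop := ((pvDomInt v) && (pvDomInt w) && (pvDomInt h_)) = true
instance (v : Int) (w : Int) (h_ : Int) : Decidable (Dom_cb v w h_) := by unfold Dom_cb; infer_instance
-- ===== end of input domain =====

-- B replaces A's guarded single pass over all 64 bit positions by a two-phase form: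
-- compute the top significant bit once via bit_length, emit the leading blanks in one
-- shot, then loop only over the significant bits (objective: alternative decomposition).

-- ===== PORT A =====
-- loop body of A, kept as a named helper (s is the accumulated string, i the loop index)
def cbBody (v : Int) (w : Int) (h_ : Int) (s : String) (i : Int) : String :=
  let bit : Int := (1 : Int) <<< i.toNat   -- 1 << i  (i ranges over 63..0, so i.toNat is exact)
  if v < bit ∧ h_ < bit then
    (if i < w then s ++ " " else s)        -- the 'continue' branch
  else
    let f : String := if PySem.Int.band i 1 ≠ 0 then "\x1b[48;5;23;" else "\x1b[48;5;233;"
    if PySem.Int.band v bit ≠ 0 then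
      let f := if PySem.Int.band h_ bit ≠ 0 then f ++ "93;1;4" else f ++ "92"
      s ++ f ++ "m" ++ "1" ++ "\x1b[m"
    else
      let f := if PySem.Int.band h_ bit ≠ 0 then f ++ "95;1;4" else f ++ "33"
      s ++ f ++ "m" ++ "0" ++ "\x1b[m"

def cb (v : Int) (w : Int) (h_ : Int) : String :=
  (PySem.List.pyRange 63 (-1) (-1)).foldl (cbBody v w h_) ""

-- ===== PORT B =====
-- B's first phase: position of the top significant bit (-1 if none), clamped to 63
def cbAltTop (v : Int) (h_ : Int) : Int :=
  let t1 : Int := if v > 0 then (PySem.Int.bitLength v : Int) - 1 else -1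
  let t2 : Int := if h_ > 0 then max t1 ((PySem.Int.bitLength h_ : Int) - 1) else t1
  if t2 > 63 then 63 else t2

-- B's loop body (only the bit/colour formatting; no blank handling)
def cbAltBody (v : Int) (h_ : Int) (s : String) (i : Int) : String :=
  let f : String := if PySem.Int.band i 1 ≠ 0 then "\x1b[48;5;23;" else "\x1b[48;5;233;"
  if PySem.Int.band v ((1 : Int) <<< i.toNat) ≠ 0 then
    let f := if PySem.Int.band h_ ((1 : Int) <<< i.toNat) ≠ 0 then f ++ "93;1;4" else f ++ "92"
    s ++ f ++ "m" ++ "1" ++ "\x1b[m"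
  else
    let f := if PySem.Int.band h_ ((1 : Int) <<< i.toNat) ≠ 0 then f ++ "95;1;4" else f ++ "33"
    s ++ f ++ "m" ++ "0" ++ "\x1b[m"

def cb_alt (v : Int) (w : Int) (h_ : Int) : String :=
  let top := cbAltTop v h_
  -- " " * max(0, min(w, 64) - (top + 1))   (the count is ≥ 0, so .toNat is exact)
  let s0 : String := String.ofList (List.replicate (max 0 (min w 64 - (top + 1))).toNat ' ')
  (PySem.List.pyRange top (-1) (-1)).foldl (cbAltBody v h_) s0

-- ===== PRECONDITION & SPEC =====
def Spec_cb (v : Int) (w : Int) (h_ : Int) (out : String) : Prop := out = cb_alt v w h_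
instance (v : Int) (w : Int) (h_ : Int) (out : String) : Decidable (Spec_cb v w h_ out) := by unfold Spec_cb; infer_instance

-- ===== CLAIM (what is proved, stated in full; the proofs are below) =====
def Claim_equal_cb : Prop := ∀ (v : Int) (w : Int) (h_ : Int), Dom_cb v w h_ → Spec_cb v w h_ (cb v w h_)

-- ===== LEMMAS AND PROOFS =====

-- the string a single active iteration appends (common to both loop bodies)
def pvChunk (v : Int) (h_ : Int) (i : Int) : String :=
  let f : String := if PySem.Int.band i 1 ≠ 0 then "\x1b[48;5;23;" else "\x1b[48;5;233;"
  if PySem.Int.band v ((1 : Int) <<< i.toNat) ≠ 0 then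
    (if PySem.Int.band h_ ((1 : Int) <<< i.toNat) ≠ 0 then f ++ "93;1;4" else f ++ "92") ++ "m" ++ "1" ++ "\x1b[m"
  else
    (if PySem.Int.band h_ ((1 : Int) <<< i.toNat) ≠ 0 then f ++ "95;1;4" else f ++ "33") ++ "m" ++ "0" ++ "\x1b[m"

-- the string one iteration of A appends
def pvT (v : Int) (w : Int) (h_ : Int) (i : Int) : String :=
  if v < (1 : Int) <<< i.toNat ∧ h_ < (1 : Int) <<< i.toNat then
    (if i < w then " " else "")
  else pvChunk v h_ i

-- concatenation of t over indices n-1, n-2, …, 0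
def pvOut (t : Int → String) : Nat → String
  | 0 => ""
  | n+1 => t (n : Int) ++ pvOut t n

lemma pvBodyA_eq (v w h_ : Int) (s : String) (i : Int) :
    cbBody v w h_ s i = s ++ pvT v w h_ i := by
  simp only [cbBody, pvT, pvChunk]
  split_ifs <;> simp [String.append_assoc]

lemma pvBodyB_eq (v h_ : Int) (s : String) (i : Int) :
    cbAltBody v h_ s i = s ++ pvChunk v h_ i := by
  simp only [cbAltBody, pvChunk]
  split_ifs <;> simp [String.append_assoc]

lemma pvFoldGen (body : String → Int → String) (t : Int → String)
    (hb : ∀ s i, body s i = s ++ t i) :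
    ∀ (n : Nat) (s : String),
      (PySem.List.pyRange ((n : Int) - 1) (-1) (-1)).foldl body s = s ++ pvOut t n := by
  intro n
  induction n with
  | zero =>
      intro s
      rw [PySem.List.pyRange_neg_one_eq_nil (by norm_num)]
      simp [pvOut]
  | succ n ih =>
      intro s
      have h1 : ((n + 1 : Nat) : Int) - 1 = (n : Int) := by push_cast; ring
      rw [h1, PySem.List.pyRange_neg_one_cons (by omega : (-1 : Int) < (n : Int))]
      rw [List.foldl_cons, ih, hb, pvOut, String.append_assoc]

-- 2^k ≤ x for a positive x whose bit_length exceeds k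
lemma pvGe_pow (x : Int) (k : Nat) (hx : 0 < x)
    (hk : (k : Int) ≤ (PySem.Int.bitLength x : Int) - 1) : ¬ x < (1 : Int) <<< k := by
  rw [Int.shiftLeft_eq, one_mul]
  have hbl : 2 ^ (PySem.Int.bitLength x - 1) ≤ x.natAbs :=
    PySem.Int.two_pow_bitLength_le x (by omega)
  have hkk : k ≤ PySem.Int.bitLength x - 1 := by omega
  have h2 : (2 : Nat) ^ k ≤ x.natAbs := le_trans (Nat.pow_le_pow_right (by norm_num) hkk) hbl
  have hxx : (x.natAbs : Int) = x := Int.natAbs_of_nonneg (le_of_lt hx)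
  have h3 : ((2 : Nat) ^ k : Int) ≤ (x.natAbs : Int) := by exact_mod_cast h2
  rw [hxx] at h3
  push_cast at h3
  exact not_lt.mpr h3

-- x < 2^k as soon as k passes x's bit_length (or x ≤ 0)
lemma pvLt_pow (x : Int) (k : Nat)
    (h : (PySem.Int.bitLength x : Int) - 1 < (k : Int) ∨ x ≤ 0) : x < (1 : Int) <<< k := by
  rw [Int.shiftLeft_eq, one_mul]
  rcases h with h | h
  · have hbl : x.natAbs < 2 ^ PySem.Int.bitLength x := PySem.Int.lt_two_pow_bitLength x
    have hk : PySem.Int.bitLength x ≤ k := by omega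
    have h2 : x.natAbs < (2 : Nat) ^ k := lt_of_lt_of_le hbl (Nat.pow_le_pow_right (by norm_num) hk)
    have h3 : x < ((2 : Nat) ^ k : Int) := lt_of_le_of_lt Int.le_natAbs (by exact_mod_cast h2)
    push_cast at h3
    exact h3
  · have hp : (0 : Int) < 2 ^ k := by positivity
    exact lt_of_le_of_lt h hp

lemma pvTop_ge (v h_ : Int) : -1 ≤ cbAltTop v h_ := by
  simp only [cbAltTop]
  split_ifs <;> omega

lemma pvTop_le (v h_ : Int) : cbAltTop v h_ ≤ 63 := by
  simp only [cbAltTop]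
  split_ifs <;> omega

lemma pvTop_eq (v h_ : Int) :
    cbAltTop v h_ =
      min (max (if v > 0 then (PySem.Int.bitLength v : Int) - 1 else -1)
               (if h_ > 0 then (PySem.Int.bitLength h_ : Int) - 1 else -1)) 63 := by
  simp only [cbAltTop]
  split_ifs <;> omega

-- every index at or below the top is active (one of v, h_ reaches that bit)
lemma pvActive (v h_ : Int) (k : Nat) (hk : (k : Int) ≤ cbAltTop v h_) :
    ¬ (v < (1 : Int) <<< k ∧ h_ < (1 : Int) <<< k) := by
  rw [pvTop_eq] at hk
  rintro ⟨hv, hh⟩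
  by_cases hvp : v > 0 <;> by_cases hhp : h_ > 0 <;>
    simp only [if_pos, hvp, hhp, if_false] at hk
  · rcases le_max_iff.mp (by omega :
        (k : Int) ≤ max ((PySem.Int.bitLength v : Int) - 1) ((PySem.Int.bitLength h_ : Int) - 1)) with h | h
    · exact pvGe_pow v k hvp h hv
    · exact pvGe_pow h_ k hhp h hh
  · exact pvGe_pow v k hvp (by omega) hv
  · exact pvGe_pow h_ k hhp (by omega) hh
  · omega

lemma pvBitLength_le_32 (x : Int) (hx : x.natAbs ≤ 2 ^ 31) : PySem.Int.bitLength x ≤ 32 := by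
  by_contra hc
  have hxz : x ≠ 0 := by
    intro h; rw [h] at hc; simp [PySem.Int.bitLength_zero] at hc
  have hbl := PySem.Int.two_pow_bitLength_le x hxz
  have h1 : (2 : Nat) ^ 32 ≤ 2 ^ (PySem.Int.bitLength x - 1) :=
    Nat.pow_le_pow_right (by norm_num) (by omega)
  have h2 : (2 : Nat) ^ 32 ≤ 2 ^ 31 := le_trans h1 (le_trans hbl hx)
  norm_num at h2

-- above the top every index is inactive (needs |v|,|h_| ≤ 2^31 so the 63-clamp is idle)
lemma pvInactive (v h_ : Int) (hv : v.natAbs ≤ 2 ^ 31) (hh : h_.natAbs ≤ 2 ^ 31)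
    (k : Nat) (hk : cbAltTop v h_ < (k : Int)) :
    v < (1 : Int) <<< k ∧ h_ < (1 : Int) <<< k := by
  have hv32 := pvBitLength_le_32 v hv
  have hh32 := pvBitLength_le_32 h_ hh
  rw [pvTop_eq] at hk
  constructor
  · by_cases hvp : v > 0
    · refine pvLt_pow v k (Or.inl ?_)
      simp only [if_pos, hvp] at hk
      omega
    · exact pvLt_pow v k (Or.inr (by omega))
  · by_cases hhp : h_ > 0
    · refine pvLt_pow h_ k (Or.inl ?_)
      simp only [if_pos, hhp] at hk
      omega
    · exact pvLt_pow h_ k (Or.inr (by omega))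

-- below the top, A's per-iteration string is exactly the chunk
lemma pvAgree (v w h_ : Int) :
    ∀ k : Nat, (k : Int) ≤ cbAltTop v h_ + 1 →
      pvOut (pvT v w h_) k = pvOut (pvChunk v h_) k := by
  intro k
  induction k with
  | zero => intro _; rfl
  | succ k ih =>
      intro hk
      have hact := pvActive v h_ k (by push_cast at hk ⊢; omega)
      rw [pvOut, pvOut, ih (by push_cast at hk ⊢; omega)]
      congr 1
      simp only [pvT, Int.toNat_natCast]
      rw [if_neg hact]

-- the main split: A's output over indices n-1..0 is the blanks followed by B's chunks
lemma pvMain (v w h_ : Int) (hv : v.natAbs ≤ 2 ^ 31) (hh : h_.natAbs ≤ 2 ^ 31) :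
    ∀ n : Nat, (cbAltTop v h_ + 1).toNat ≤ n →
      pvOut (pvT v w h_) n =
        String.ofList (List.replicate (min w (n : Int) - (cbAltTop v h_ + 1)).toNat ' ') ++
          pvOut (pvChunk v h_) (cbAltTop v h_ + 1).toNat := by
  have htopge := pvTop_ge v h_
  intro n hn
  induction n, hn using Nat.le_induction with
  | base =>
      have hc : (min w ((cbAltTop v h_ + 1).toNat : Int) - (cbAltTop v h_ + 1)).toNat = 0 := by
        omega
      rw [hc]
      simp only [List.replicate_zero, String.ofList_nil, String.empty_append]
      exact pvAgree v w h_ _ (by omega)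
  | succ n hn ih =>
      have hinact := pvInactive v h_ hv hh n (by omega)
      rw [pvOut]
      simp only [pvT, Int.toNat_natCast]
      rw [if_pos hinact, ih]
      by_cases hw : (n : Int) < w
      · rw [if_pos hw]
        have hc : (min w ((n + 1 : Nat) : Int) - (cbAltTop v h_ + 1)).toNat
            = (min w (n : Int) - (cbAltTop v h_ + 1)).toNat + 1 := by
          push_cast; omega
        rw [hc, List.replicate_succ]
        rw [show (" " : String) = String.ofList [' '] from by simp]
        rw [← String.append_assoc, ← String.ofList_append]
        rfl
      · rw [if_neg hw]
        have hc : (min w ((n + 1 : Nat) : Int) - (cbAltTop v h_ + 1)).toNat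
            = (min w (n : Int) - (cbAltTop v h_ + 1)).toNat := by
          push_cast; omega
        rw [hc, String.empty_append]

lemma pvCb_eq (v w h_ : Int) : cb v w h_ = pvOut (pvT v w h_) 64 := by
  have h := pvFoldGen (cbBody v w h_) (pvT v w h_) (pvBodyA_eq v w h_) 64 ""
  have h63 : ((64 : Nat) : Int) - 1 = 63 := by norm_num
  rw [h63] at h
  rw [cb, h, String.empty_append]

lemma pvCbAlt_eq (v w h_ : Int) :
    cb_alt v w h_ =
      String.ofList (List.replicate (max 0 (min w 64 - (cbAltTop v h_ + 1))).toNat ' ') ++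
        pvOut (pvChunk v h_) (cbAltTop v h_ + 1).toNat := by
  have htopge := pvTop_ge v h_
  have h := pvFoldGen (cbAltBody v h_) (pvChunk v h_) (pvBodyB_eq v h_)
      (cbAltTop v h_ + 1).toNat
      (String.ofList (List.replicate (max 0 (min w 64 - (cbAltTop v h_ + 1))).toNat ' '))
  have hm : (((cbAltTop v h_ + 1).toNat : Int)) - 1 = cbAltTop v h_ := by omega
  rw [hm] at h
  rw [cb_alt]
  exact h

-- ===== VERDICT (by name: the statement is the Claim_ definition above) =====
theorem cb_spec : Claim_equal_cb := by
  intro v w h_ hdom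
  have hv : v.natAbs ≤ 2 ^ 31 := by
    simp only [Dom_cb, pvDomInt, Bool.and_eq_true, decide_eq_true_eq] at hdom
    omega
  have hh : h_.natAbs ≤ 2 ^ 31 := by
    simp only [Dom_cb, pvDomInt, Bool.and_eq_true, decide_eq_true_eq] at hdom
    omega
  have htople := pvTop_le v h_
  have htopge := pvTop_ge v h_
  have hcnt : (min w ((64 : Nat) : Int) - (cbAltTop v h_ + 1)).toNat
      = (max 0 (min w 64 - (cbAltTop v h_ + 1))).toNat := by
    push_cast; omega
  show cb v w h_ = cb_alt v w h_
  rw [pvCb_eq, pvMain v w h_ hv hh 64 (by omega), hcnt, pvCbAlt_eq]
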